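-- pv_equiv track=rewrite | github.com/EmbeddedGUI/EmbeddedGUI | scripts/ui_designer/generator/code_generator.py | _clean_preserved_block
-- ===== SOURCE A (Python) =====
-- def _clean_preserved_block(text, skip_lines):
--     if not text:
--         return ""
--
--     normalized_skip = {line.strip() for line in skip_lines if line.strip()}
--     kept_lines = []
--     for line in text.splitlines():
--         if line.strip() in normalized_skip:
--             continue
--         kept_lines.append(line.rstrip())
--
--     while kept_lines and not kept_lines[0].strip():
--         kept_lines.pop(0)
--     while kept_lines and not kept_lines[-1].strip():
--         kept_lines.pop()
--
--     if not kept_lines: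
--         return ""
--     return "\n".join(kept_lines) + "\n"
-- ===== SOURCE B (Python) =====
-- def _clean_preserved_block(text, skip_lines):
--     skip = {l.strip() for l in skip_lines if l.strip()}
--     out = []
--     pending = 0
--     for line in text.splitlines():
--         core = line.strip()
--         if core in skip:
--             continue
--         if core:
--             out.append("\n" * pending)
--             out.append(line.rstrip() + "\n")
--             pending = 0
--         elif out:
--             pending += 1
--     return "".join(out)
-- ===== Notes on version B (the rewrite author's own statement) =====
-- stated objective: alternative
-- what changed: B is a single forward pass that builds the output string directly with a deferred-blank counter (blank lines are counted and their newlines flushed only when a later content line arrives, leading blanks never emitted), eliminating A's intermediate kept_lines list and both while-pop edge-trimming loops.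
import Mathlib
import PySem

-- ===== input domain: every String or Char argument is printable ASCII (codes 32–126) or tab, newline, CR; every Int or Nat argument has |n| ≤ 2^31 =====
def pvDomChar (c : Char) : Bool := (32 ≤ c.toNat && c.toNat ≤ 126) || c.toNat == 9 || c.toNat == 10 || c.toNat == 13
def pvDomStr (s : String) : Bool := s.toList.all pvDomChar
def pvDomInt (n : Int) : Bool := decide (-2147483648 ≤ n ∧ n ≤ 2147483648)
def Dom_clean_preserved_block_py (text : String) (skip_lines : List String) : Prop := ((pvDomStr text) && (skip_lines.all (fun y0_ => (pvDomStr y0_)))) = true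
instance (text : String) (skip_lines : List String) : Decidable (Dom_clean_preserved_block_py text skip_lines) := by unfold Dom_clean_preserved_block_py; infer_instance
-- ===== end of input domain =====

-- B is a single forward pass building the output string directly with a deferred-blank counter,
-- removing A's intermediate kept_lines list and its two while-pop edge-trimming loops (objective: alternative).

-- ===== PORT A =====
-- while kept_lines and not kept_lines[0].strip(): kept_lines.pop(0)
def pvPopFrontBlank : List String → List String
  | [] => []
  | l :: rest => if PySem.Str.strip l = "" then pvPopFrontBlank rest else l :: rest

-- while kept_lines and not kept_lines[-1].strip(): kept_lines.pop()   (popping from the end = popping from the front of the reverse)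
def pvPopBackBlank (ls : List String) : List String :=
  (pvPopFrontBlank ls.reverse).reverse

def clean_preserved_block_py (text : String) (skip_lines : List String) : String :=
  if text = "" then ""
  else
    let normalized_skip : PySem.Set String :=
      skip_lines.foldl (fun s l => if PySem.Str.strip l ≠ "" then PySem.Set.add s (PySem.Str.strip l) else s) PySem.Set.empty
    let kept_lines : List String :=
      (PySem.Str.splitlines text).foldl
        (fun acc line => if PySem.Set.contains normalized_skip (PySem.Str.strip line) then acc
                         else acc ++ [PySem.Str.rstrip line]) []
    let kept := pvPopBackBlank (pvPopFrontBlank kept_lines)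
    if kept = [] then ""
    -- '"\n".join(kept_lines) + "\n"' — the final '+ "\n"' done on the character list (exact)
    else String.ofList ((PySem.Str.join "\n" kept).toList ++ ['\n'])

-- ===== PORT B =====
-- state (out, pending); '"\n" * pending' and 'line.rstrip() + "\n"' built on character lists (exact)
def clean_preserved_block_py_alt (text : String) (skip_lines : List String) : String :=
  let skip : PySem.Set String :=
    skip_lines.foldl (fun s l => if PySem.Str.strip l ≠ "" then PySem.Set.add s (PySem.Str.strip l) else s) PySem.Set.empty
  let st : List String × Nat :=
    (PySem.Str.splitlines text).foldl
      (fun st line =>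
        if PySem.Set.contains skip (PySem.Str.strip line) then st
        else if PySem.Str.strip line ≠ "" then
          (st.1 ++ [String.ofList (List.replicate st.2 '\n'),
                    String.ofList ((PySem.Str.rstrip line).toList ++ ['\n'])], 0)
        else if st.1 ≠ [] then (st.1, st.2 + 1) else st)
      ([], 0)
  PySem.Str.join "" st.1

-- ===== PRECONDITION & SPEC =====
def Spec_clean_preserved_block_py (text : String) (skip_lines : List String) (out : String) : Prop := out = clean_preserved_block_py_alt text skip_lines
instance (text : String) (skip_lines : List String) (out : String) : Decidable (Spec_clean_preserved_block_py text skip_lines out) := by unfold Spec_clean_preserved_block_py; infer_instance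

-- ===== CLAIM (what is proved, stated in full; the proofs are below) =====
def Claim_equal_clean_preserved_block_py : Prop := ∀ (text : String) (skip_lines : List String), Dom_clean_preserved_block_py text skip_lines → Spec_clean_preserved_block_py text skip_lines (clean_preserved_block_py text skip_lines)

-- ===== LEMMAS AND PROOFS =====

-- B's per-kept-line step (proof device: B's survey of a kept — already rstripped — line)
def pvStepK (st : List String × Nat) (r : String) : List String × Nat :=
  if PySem.Str.strip r ≠ "" then
    (st.1 ++ [String.ofList (List.replicate st.2 '\n'), String.ofList (r.toList ++ ['\n'])], 0)
  else if st.1 ≠ [] then (st.1, st.2 + 1) else st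

-- the characters B emits over a kept suffix, given `p` pending blank lines, once output has started
def pvF : Nat → List String → List Char
  | _, [] => []
  | p, r :: rest =>
    if PySem.Str.strip r ≠ "" then List.replicate p '\n' ++ r.toList ++ '\n' :: pvF 0 rest
    else pvF (p + 1) rest

def pvHasC (K : List String) : Bool := K.any (fun r => !(PySem.Str.strip r == ""))

def pvGood (K : List String) : Prop := ∀ r ∈ K, PySem.Str.strip r = "" → r = ""

theorem pv_rstrip_nil_iff (l : List Char) :
    PySem.Chars.rstrip l = [] ↔ ∀ c ∈ l, PySem.Chars.isspace c = true := by
  unfold PySem.Chars.rstrip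
  rw [List.reverse_eq_nil_iff, List.dropWhile_eq_nil_iff]
  constructor
  · intro h c hc; exact h c (List.mem_reverse.mpr hc)
  · intro h c hc; exact h c (List.mem_reverse.mp hc)

theorem pv_mem_rstrip {c : Char} {l : List Char} (h : c ∈ PySem.Chars.rstrip l) : c ∈ l := by
  unfold PySem.Chars.rstrip at h
  rw [List.mem_reverse] at h
  exact List.mem_reverse.mp ((List.dropWhile_sublist _).subset h)

theorem pv_strip_nil_iff (l : List Char) :
    PySem.Chars.strip l = [] ↔ ∀ c ∈ l, PySem.Chars.isspace c = true := by
  show PySem.Chars.rstrip (PySem.Chars.lstrip l) = [] ↔ _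
  rw [pv_rstrip_nil_iff]
  unfold PySem.Chars.lstrip
  constructor
  · intro h c hc
    rw [← List.takeWhile_append_dropWhile (p := PySem.Chars.isspace) (l := l)] at hc
    rcases List.mem_append.mp hc with hm | hm
    · exact List.mem_takeWhile_imp hm
    · exact h c hm
  · intro h c hc
    exact h c ((List.dropWhile_sublist _).subset hc)

theorem pv_strip_rstrip_nil_iff (s : String) :
    PySem.Str.strip (PySem.Str.rstrip s) = "" ↔ PySem.Str.strip s = "" := by
  rw [← String.toList_inj, ← String.toList_inj]
  rw [PySem.Str.toList_strip, PySem.Str.toList_strip, PySem.Str.toList_rstrip]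
  show PySem.Chars.strip (PySem.Chars.rstrip s.toList) = [] ↔ PySem.Chars.strip s.toList = []
  rw [pv_strip_nil_iff, pv_strip_nil_iff]
  constructor
  · intro h c hc
    by_cases hm : c ∈ PySem.Chars.rstrip s.toList
    · exact h c hm
    · -- c is in the stripped-off all-space suffix
      have hc' : c ∈ s.toList.reverse := List.mem_reverse.mpr hc
      rw [← List.takeWhile_append_dropWhile (p := PySem.Chars.isspace) (l := s.toList.reverse)] at hc'
      rcases List.mem_append.mp hc' with hm' | hm'
      · exact List.mem_takeWhile_imp hm'
      · exact absurd (by unfold PySem.Chars.rstrip; exact List.mem_reverse.mpr hm') hm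
  · intro h c hc
    exact h c (pv_mem_rstrip hc)

theorem pv_good_rstrip (s : String) (h : PySem.Str.strip (PySem.Str.rstrip s) = "") :
    PySem.Str.rstrip s = "" := by
  rw [← String.toList_inj, PySem.Str.toList_rstrip]
  rw [pv_strip_rstrip_nil_iff, ← String.toList_inj, PySem.Str.toList_strip] at h
  show PySem.Chars.rstrip s.toList = []
  rw [pv_rstrip_nil_iff]
  exact (pv_strip_nil_iff s.toList).mp h

-- A's kept_lines loop is the filter+map
theorem pv_loop_eq (S : PySem.Set String) (lines : List String) :
    lines.foldl (fun acc line => if PySem.Set.contains S (PySem.Str.strip line) then acc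
                                 else acc ++ [PySem.Str.rstrip line]) []
      = (lines.filter (fun l => !(PySem.Set.contains S (PySem.Str.strip l)))).map PySem.Str.rstrip := by
  have hf : (fun (acc : List String) line => if PySem.Set.contains S (PySem.Str.strip line) then acc
                                             else acc ++ [PySem.Str.rstrip line])
      = (fun acc line => if (!(PySem.Set.contains S (PySem.Str.strip line))) = true
                         then acc ++ [PySem.Str.rstrip line] else acc) := by
    funext acc line
    cases hq : PySem.Set.contains S (PySem.Str.strip line) <;> simp
  rw [hf, PySem.List.foldl_append_if]
  simp

-- B's loop over raw lines is pvStepK over the kept (filtered, rstripped) lines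
theorem pv_foldB_eq (S : PySem.Set String) (lines : List String) (st : List String × Nat) :
    lines.foldl
      (fun st line =>
        if PySem.Set.contains S (PySem.Str.strip line) then st
        else if PySem.Str.strip line ≠ "" then
          (st.1 ++ [String.ofList (List.replicate st.2 '\n'),
                    String.ofList ((PySem.Str.rstrip line).toList ++ ['\n'])], 0)
        else if st.1 ≠ [] then (st.1, st.2 + 1) else st) st
      = ((lines.filter (fun l => !(PySem.Set.contains S (PySem.Str.strip l)))).map PySem.Str.rstrip).foldl pvStepK st := by
  induction lines generalizing st with
  | nil => rfl
  | cons l rest ih =>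
    cases hc : PySem.Set.contains S (PySem.Str.strip l) with
    | true =>
      rw [List.filter_cons_of_neg (by rw [hc]; decide)]
      simp only [List.foldl_cons, hc, reduceIte]
      exact ih st
    | false =>
      rw [List.filter_cons_of_pos (by rw [hc]; decide)]
      simp only [List.foldl_cons, hc, Bool.false_eq_true, reduceIte, List.map_cons]
      rw [ih]
      have hstep : (if PySem.Str.strip l ≠ "" then
          (st.1 ++ [String.ofList (List.replicate st.2 '\n'),
                    String.ofList ((PySem.Str.rstrip l).toList ++ ['\n'])], 0)
        else if st.1 ≠ [] then (st.1, st.2 + 1) else st) = pvStepK st (PySem.Str.rstrip l) := by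
        unfold pvStepK
        by_cases hb : PySem.Str.strip l = ""
        · have h1 : ¬ (PySem.Str.strip l ≠ "") := by simpa using hb
          have h2 : ¬ (PySem.Str.strip (PySem.Str.rstrip l) ≠ "") := by
            simp [(pv_strip_rstrip_nil_iff l).mpr hb]
          rw [if_neg h1, if_neg h2]
        · have h1 : PySem.Str.strip l ≠ "" := hb
          have h2 : PySem.Str.strip (PySem.Str.rstrip l) ≠ "" :=
            fun h => hb ((pv_strip_rstrip_nil_iff l).mp h)
          rw [if_pos h1, if_pos h2]
      rw [hstep]

-- ---- trimming lemmas ----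
theorem pv_PF_nil_iff (K : List String) : pvPopFrontBlank K = [] ↔ pvHasC K = false := by
  induction K with
  | nil => simp [pvPopFrontBlank, pvHasC]
  | cons r rest ih =>
    by_cases hb : PySem.Str.strip r = ""
    · rw [pvPopFrontBlank, if_pos hb, ih]
      simp [pvHasC, hb]
    · rw [pvPopFrontBlank, if_neg hb]
      simp [pvHasC, hb]

theorem pv_PF_append (A B : List String) :
    pvPopFrontBlank (A ++ B) = if pvPopFrontBlank A = [] then pvPopFrontBlank B else pvPopFrontBlank A ++ B := by
  induction A with
  | nil => simp [pvPopFrontBlank]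
  | cons r rest ih =>
    by_cases hb : PySem.Str.strip r = ""
    · rw [List.cons_append, pvPopFrontBlank, if_pos hb, ih, pvPopFrontBlank, if_pos hb]
    · rw [List.cons_append, pvPopFrontBlank, if_neg hb, pvPopFrontBlank, if_neg hb, if_neg (by simp)]
      rfl

theorem pv_PB_cons_hasC {rest : List String} (r : String) (h : pvHasC rest = true) :
    pvPopBackBlank (r :: rest) = r :: pvPopBackBlank rest := by
  unfold pvPopBackBlank
  rw [List.reverse_cons, pv_PF_append,
      if_neg (by
        intro h0
        rw [pv_PF_nil_iff] at h0
        simp [pvHasC] at h h0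
        rcases h with ⟨x, hx, hs⟩
        exact hs (h0 x hx))]
  simp

theorem pv_PB_cons_all {rest : List String} (r : String) (h : pvHasC rest = false)
    (hr : PySem.Str.strip r ≠ "") : pvPopBackBlank (r :: rest) = [r] := by
  unfold pvPopBackBlank
  rw [List.reverse_cons, pv_PF_append,
      if_pos (by rw [pv_PF_nil_iff]; simp [pvHasC] at h ⊢; intro x hx; exact h x hx)]
  simp [pvPopFrontBlank, hr]

theorem pv_PB_ne {K : List String} (h : pvHasC K = true) : pvPopBackBlank K ≠ [] := by
  intro h0
  unfold pvPopBackBlank at h0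
  rw [List.reverse_eq_nil_iff, pv_PF_nil_iff] at h0
  simp [pvHasC] at h h0
  rcases h with ⟨x, hx, hs⟩
  exact hs (h0 x hx)

theorem pv_PF_hasC {K : List String} (h : pvHasC K = true) : pvHasC (pvPopFrontBlank K) = true := by
  induction K with
  | nil => simpa [pvHasC] using h
  | cons r rest ih =>
    by_cases hb : PySem.Str.strip r = ""
    · rw [pvPopFrontBlank, if_pos hb]
      exact ih (by simpa [pvHasC, hb] using h)
    · rw [pvPopFrontBlank, if_neg hb]
      simp [pvHasC, hb]

theorem pv_trim_nil_iff (K : List String) :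
    pvPopBackBlank (pvPopFrontBlank K) = [] ↔ pvHasC K = false := by
  constructor
  · intro h
    by_contra hc
    simp only [Bool.not_eq_false] at hc
    exact pv_PB_ne (pv_PF_hasC hc) h
  · intro h
    rw [(pv_PF_nil_iff K).mpr h]
    rfl

-- ---- join lemmas ----
theorem pv_joinE (L : List String) : (PySem.Str.join "" L).toList = L.flatMap String.toList := by
  unfold PySem.Str.join
  rw [String.toList_ofList]
  show PySem.Chars.join [] (L.map String.toList) = _
  induction L with
  | nil => rfl
  | cons a t ih =>
    cases t with
    | nil => simp [PySem.Chars.join_singleton]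
    | cons b t' =>
      rw [List.map_cons, List.map_cons, PySem.Chars.join_cons_cons, List.flatMap_cons, ← ih]
      simp

theorem pv_joinNL (r : String) (T : List String) (h : T ≠ []) :
    (PySem.Str.join "\n" (r :: T)).toList = r.toList ++ '\n' :: (PySem.Str.join "\n" T).toList := by
  obtain ⟨x, t, rfl⟩ : ∃ x t, T = x :: t := by
    cases T with | nil => cases h rfl | cons x t => exact ⟨x, t, rfl⟩
  unfold PySem.Str.join
  simp only [String.toList_ofList, List.map_cons]
  rw [PySem.Chars.join_cons_cons]
  simp [show ("\n" : String).toList = ['\n'] from rfl]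

-- ---- B's accumulated output ----
theorem pv_MID (K : List String) (out : List String) (p : Nat) (hne : out ≠ []) :
    ((K.foldl pvStepK (out, p)).1.flatMap String.toList) = out.flatMap String.toList ++ pvF p K := by
  induction K generalizing out p with
  | nil => simp [pvF]
  | cons r rest ih =>
    by_cases hb : PySem.Str.strip r = ""
    · rw [List.foldl_cons, show pvStepK (out, p) r = (out, p + 1) from by
            unfold pvStepK; rw [if_neg (by simpa using hb), if_pos hne]]
      rw [ih out (p + 1) hne, pvF, if_neg (by simpa using hb)]
    · rw [List.foldl_cons, show pvStepK (out, p) r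
            = (out ++ [String.ofList (List.replicate p '\n'), String.ofList (r.toList ++ ['\n'])], 0) from by
            unfold pvStepK; rw [if_pos (by simpa using hb)]]
      rw [ih _ 0 (by simp), pvF, if_pos (by simpa using hb)]
      simp

theorem pv_rep_shift : ∀ (p : Nat) (X : List Char),
    '\n' :: (List.replicate p '\n' ++ X) = List.replicate p '\n' ++ '\n' :: X
  | 0, _ => rfl
  | p + 1, X => by
      rw [List.replicate_succ, List.cons_append, List.cons_append, ← pv_rep_shift p X]

theorem pv_KEY (K : List String) (hG : pvGood K) (p : Nat) :
    pvF p K = if pvHasC K = true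
              then List.replicate p '\n' ++ (PySem.Str.join "\n" (pvPopBackBlank K)).toList ++ ['\n']
              else [] := by
  induction K generalizing p with
  | nil => simp [pvF, pvHasC]
  | cons r rest ih =>
    have hGrest : pvGood rest := fun x hx => hG x (List.mem_cons_of_mem _ hx)
    by_cases hb : PySem.Str.strip r = ""
    · have hr : r = "" := hG r List.mem_cons_self hb
      rw [pvF, if_neg (by simpa using hb), ih hGrest]
      have hh : pvHasC (r :: rest) = pvHasC rest := by simp [pvHasC, hb]
      rw [hh]
      by_cases hc : pvHasC rest = true
      · rw [if_pos hc, if_pos hc, pv_PB_cons_hasC r hc, pv_joinNL r _ (pv_PB_ne hc)]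
        subst hr
        simp [List.replicate_succ, pv_rep_shift]
      · rw [if_neg hc, if_neg hc]
    · rw [pvF, if_pos (by simpa using hb), ih hGrest]
      have hh : pvHasC (r :: rest) = true := by simp [pvHasC, hb]
      rw [hh, if_pos rfl]
      by_cases hc : pvHasC rest = true
      · rw [if_pos hc, pv_PB_cons_hasC r hc, pv_joinNL r _ (pv_PB_ne hc)]
        simp
      · have hF : pvHasC rest = false := by simpa using hc
        rw [if_neg hc, pv_PB_cons_all r hF hb, PySem.Str.join]
        simp [PySem.Chars.join_singleton]

theorem pv_START (K : List String) (hG : pvGood K) :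
    (K.foldl pvStepK ([], 0)).1.flatMap String.toList
      = if pvHasC K = true
        then (PySem.Str.join "\n" (pvPopBackBlank (pvPopFrontBlank K))).toList ++ ['\n']
        else [] := by
  induction K with
  | nil => simp [pvHasC]
  | cons r rest ih =>
    have hGrest : pvGood rest := fun x hx => hG x (List.mem_cons_of_mem _ hx)
    by_cases hb : PySem.Str.strip r = ""
    · rw [List.foldl_cons, show pvStepK ([], 0) r = ([], 0) from by
            unfold pvStepK; rw [if_neg (by simpa using hb), if_neg (by simp)]]
      rw [ih hGrest, pvPopFrontBlank, if_pos hb]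
      congr 1
      simp [pvHasC, hb]
    · rw [List.foldl_cons, show pvStepK ([], 0) r
            = ([String.ofList (List.replicate 0 '\n'), String.ofList (r.toList ++ ['\n'])], 0) from by
            unfold pvStepK; rw [if_pos (by simpa using hb)]; rfl]
      rw [pv_MID _ _ _ (by simp)]
      have hkey := pv_KEY (r :: rest) hG 0
      rw [pvF, if_pos (by simpa using hb)] at hkey
      rw [show ([String.ofList (List.replicate 0 '\n'), String.ofList (r.toList ++ ['\n'])].flatMap String.toList)
            = List.replicate 0 '\n' ++ r.toList ++ ['\n'] from by simp]
      rw [show pvHasC (r :: rest) = true from by simp [pvHasC, hb], if_pos rfl]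
      rw [pvPopFrontBlank, if_neg hb]
      rw [show pvHasC (r :: rest) = true from by simp [pvHasC, hb], if_pos rfl] at hkey
      simpa using hkey

-- ===== VERDICT (by name: the statement is the Claim_ definition above) =====
theorem clean_preserved_block_py_spec : Claim_equal_clean_preserved_block_py := by
  intro text skip_lines _
  unfold Spec_clean_preserved_block_py clean_preserved_block_py clean_preserved_block_py_alt
  simp only []
  rw [← String.toList_inj, pv_foldB_eq, pv_joinE, pv_loop_eq]
  set S : PySem.Set String :=
    skip_lines.foldl (fun s l => if PySem.Str.strip l ≠ "" then PySem.Set.add s (PySem.Str.strip l) else s) PySem.Set.empty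
  set kept := ((PySem.Str.splitlines text).filter (fun l => !(PySem.Set.contains S (PySem.Str.strip l)))).map PySem.Str.rstrip with hkept
  have hG : pvGood kept := by
    intro r hr hs
    rcases List.mem_map.mp hr with ⟨m, _, rfl⟩
    exact pv_good_rstrip m hs
  by_cases ht : text = ""
  · subst ht
    rw [if_pos rfl]
    have hk : kept = [] := by rw [hkept]; rfl
    rw [hk]
    rfl
  · rw [if_neg ht, pv_START kept hG]
    by_cases hc : pvHasC kept = true
    · have htr : pvPopBackBlank (pvPopFrontBlank kept) ≠ [] := by
        intro h0
        rw [pv_trim_nil_iff] at h0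
        simp [hc] at h0
      rw [if_pos hc, if_neg htr, String.toList_ofList]
    · have hF : pvHasC kept = false := by simpa using hc
      rw [if_neg hc, if_pos ((pv_trim_nil_iff kept).mpr hF)]
      rfl
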